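-- pv_equiv track=rewrite | github.com/olgaObnosova/EGE_4 | 23/9964.py | f
-- ===== SOURCE A (Python) =====
-- def f(start, stop,k):
--     if start>stop:
--         return 0
--     elif start==stop and 'CAC' in k:
--         return 1
--     elif start==stop and 'CAC' not in k:
--         return 0
--     return f(start+1, stop, k+'A')+\
--                f(start*3, stop, k+'B')\
--            +f(start+5, stop, k+'C')
-- ===== SOURCE B (Python) =====
-- def _step(s, ch):
--     # automaton state: number of chars of 'CAC' matched so far (3 = already seen, absorbing)
--     if s >= 3:
--         return 3
--     if ch == 'C':
--         return 3 if s == 2 else 1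
--     if ch == 'A' and s == 1:
--         return 2
--     return 0
--
-- def f(start, stop, k):
--     if start > stop:
--         return 0
--     s0 = 0
--     for ch in k:
--         s0 = _step(s0, ch)
--     table = {}
--     for v in range(stop, start - 1, -1):
--         for s in range(4):
--             if v == stop:
--                 table[(v, s)] = 1 if s == 3 else 0
--             else:
--                 table[(v, s)] = (
--                     (0 if v + 1 > stop else table.get((v + 1, _step(s, 'A')), 0))
--                     + (0 if v * 3 > stop else table.get((v * 3, _step(s, 'B')), 0))
--                     + (0 if v + 5 > stop else table.get((v + 5, _step(s, 'C')), 0))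
--                 )
--     return table.get((start, s0), 0)
-- ===== Notes on version B (the rewrite author's own statement) =====
-- stated objective: faster
-- what changed: Replaced A's exponential recursion over ever-growing path strings by a bottom-up table DP over (value, CAC-automaton state in 0..3), filled from stop down to start in one pass.
import Mathlib
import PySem

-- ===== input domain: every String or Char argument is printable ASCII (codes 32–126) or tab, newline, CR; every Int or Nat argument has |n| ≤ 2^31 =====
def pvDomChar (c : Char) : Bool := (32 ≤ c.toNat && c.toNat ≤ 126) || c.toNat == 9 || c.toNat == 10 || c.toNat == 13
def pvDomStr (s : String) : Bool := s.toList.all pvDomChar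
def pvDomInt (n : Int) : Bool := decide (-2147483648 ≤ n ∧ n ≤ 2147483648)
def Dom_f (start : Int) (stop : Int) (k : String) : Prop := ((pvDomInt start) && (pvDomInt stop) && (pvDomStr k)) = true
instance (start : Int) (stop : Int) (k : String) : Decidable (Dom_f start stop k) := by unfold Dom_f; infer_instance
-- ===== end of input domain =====

-- B replaces A's exponential recursion over growing path strings by a bottom-up DP table
-- over (value, 'CAC'-automaton state); objective: faster (asymptotic).

-- ===== PORT A =====
-- Literal port of A's recursion; the Nat fuel only makes the recursion structural:
-- it is (stop - start + 1).toNat, an upper bound on the recursion depth (each call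
-- strictly increases start when start ≥ 1, the domain Pre_f admits), so the fuel
-- never runs out on admitted inputs.
def fA (fuel : Nat) (start stop : Int) (k : List Char) : Int :=
  match fuel with
  | 0 => 0
  | n + 1 =>
    if start > stop then 0
    else if start = stop ∧ PySem.Chars.isIn ['C','A','C'] k = true then 1
    else if start = stop ∧ ¬ (PySem.Chars.isIn ['C','A','C'] k = true) then 0
    else fA n (start + 1) stop (k ++ ['A']) + fA n (start * 3) stop (k ++ ['B'])
           + fA n (start + 5) stop (k ++ ['C'])

def f (start : Int) (stop : Int) (k : String) : Int :=
  fA (stop - start + 1).toNat start stop k.toList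

-- ===== PORT B =====
-- automaton: number of leading chars of 'CAC' matched by a suffix (3 = seen, absorbing)
def bStep (s : Int) (ch : Char) : Int :=
  if s ≥ 3 then 3
  else if ch = 'C' then (if s = 2 then 3 else 1)
  else if ch = 'A' ∧ s = 1 then 2
  else 0

-- one row of the DP table: entries (v, s) for s = 0..3
def bRow (stop : Int) (d : Std.HashMap (Int × Int) Int) (v : Int) : Std.HashMap (Int × Int) Int :=
  (PySem.List.pyRange 0 4 1).foldl (fun d s =>
    d.insert (v, s)
      (if v = stop then (if s = 3 then 1 else 0)
       else (if v + 1 > stop then 0 else d.getD (v + 1, bStep s 'A') 0)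
          + (if v * 3 > stop then 0 else d.getD (v * 3, bStep s 'B') 0)
          + (if v + 5 > stop then 0 else d.getD (v + 5, bStep s 'C') 0))) d

def f_alt (start : Int) (stop : Int) (k : String) : Int :=
  if start > stop then 0
  else
    let s0 := k.toList.foldl bStep 0
    let table := (PySem.List.pyRange stop (start - 1) (-1)).foldl (bRow stop) (∅ : Std.HashMap (Int × Int) Int)
    table.getD (start, s0) 0

-- ===== PRECONDITION & SPEC =====
-- Pre_f excludes exactly the inputs with start ≤ 0 and start ≤ stop, on which A's
-- recursion never terminates (the start*3 branch never increases start past stop)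
-- and Python raises RecursionError.
def Pre_f (start : Int) (stop : Int) (k : String) : Prop := stop < start ∨ 1 ≤ start
instance (start : Int) (stop : Int) (k : String) : Decidable (Pre_f start stop k) := by
  unfold Pre_f; infer_instance

def pvWitness_f : Int × Int × String := (1, 10, "CA")

def Spec_f (start : Int) (stop : Int) (k : String) (out : Int) : Prop := out = f_alt start stop k
instance (start : Int) (stop : Int) (k : String) (out : Int) : Decidable (Spec_f start stop k out) := by
  unfold Spec_f; infer_instance

-- ===== CLAIM (what is proved, stated in full; the proofs are below) =====
def Claim_equal_f : Prop := ∀ (start : Int) (stop : Int) (k : String),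
  Dom_f start stop k → Pre_f start stop k → Spec_f start stop k (f start stop k)

-- ===== LEMMAS AND PROOFS =====

-- the mathematical count, on automaton states, with fuel
def gAux (fuel : Nat) (stop v s : Int) : Int :=
  match fuel with
  | 0 => 0
  | n + 1 =>
    if v > stop then 0
    else if v = stop then (if s = 3 then 1 else 0)
    else gAux n stop (v + 1) (bStep s 'A') + gAux n stop (v * 3) (bStep s 'B')
           + gAux n stop (v + 5) (bStep s 'C')

-- the closed-form characterisation of the automaton after reading l
def specState (l : List Char) : Int :=
  if ['C','A','C'] <:+: l then 3
  else if ['C','A'] <:+ l then 2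
  else if ['C'] <:+ l then 1
  else 0

theorem suffix_snoc_iff {alpha : Type} (xs : List alpha) (x : alpha) (l : List alpha) (c : alpha) :
    (xs ++ [x]) <:+ (l ++ [c]) ↔ x = c ∧ xs <:+ l := by
  simp only [← List.reverse_prefix, List.reverse_append, List.reverse_cons, List.reverse_nil,
    List.nil_append, List.cons_append]
  exact List.cons_prefix_cons

theorem singleton_suffix_snoc {alpha : Type} (x : alpha) (l : List alpha) (c : alpha) :
    [x] <:+ (l ++ [c]) ↔ x = c := by
  have h := suffix_snoc_iff ([] : List alpha) x l c
  simpa using h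

theorem infix_snoc_iff {alpha : Type} (p : List alpha) (l : List alpha) (c : alpha) :
    p <:+: (l ++ [c]) ↔ p <:+: l ∨ p <:+ (l ++ [c]) := by
  constructor
  · rintro ⟨s, t, hst⟩
    rcases List.eq_nil_or_concat t with rfl | ⟨t', c', rfl⟩
    · right; exact ⟨s, by simpa using hst⟩
    · left
      have h2 : (s ++ p ++ t') ++ [c'] = l ++ [c] := by
        simpa [List.append_assoc] using hst
      obtain ⟨h3, _⟩ := List.append_inj' h2 (by simp)
      exact ⟨s, t', by rw [← h3]⟩
  · rintro (h | h)
    · exact h.trans (List.prefix_append l [c]).isInfix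
    · exact h.isInfix

theorem suffix_CA_not_C (l : List Char) : ['C','A'] <:+ l → ¬ ['C'] <:+ l := by
  rintro ⟨t, rfl⟩ ⟨t', ht⟩
  have h1 : (t' ++ ['C']).getLast? = some 'C' := List.getLast?_concat
  have h2 : ((t ++ ['C']) ++ ['A']).getLast? = some 'A' := List.getLast?_concat
  rw [ht] at h1
  have h3 : t ++ ['C','A'] = (t ++ ['C']) ++ ['A'] := by simp
  rw [h3] at h1
  rw [h1] at h2
  simp at h2

theorem scan_eq_specState (l : List Char) : l.foldl bStep 0 = specState l := by
  induction l using List.reverseRecOn with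
  | nil => simp [specState]
  | append_singleton l c ih =>
    rw [List.foldl_append, List.foldl_cons, List.foldl_nil, ih]
    have hCAC : (['C','A','C'] : List Char) = ['C','A'] ++ ['C'] := rfl
    by_cases hI : ['C','A','C'] <:+: l
    · have hI' : ['C','A','C'] <:+: l ++ [c] := hI.trans (List.prefix_append l [c]).isInfix
      simp only [specState, if_pos hI, if_pos hI', bStep]
      norm_num
    · have hinf : (['C','A','C'] <:+: l ++ [c]) ↔ (c = 'C' ∧ ['C','A'] <:+ l) := by
        rw [infix_snoc_iff]
        constructor
        · rintro (h | h)
          · exact absurd h hI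
          · rw [hCAC, suffix_snoc_iff] at h; exact ⟨h.1.symm, h.2⟩
        · rintro ⟨rfl, h⟩
          exact Or.inr (by rw [hCAC, suffix_snoc_iff]; exact ⟨rfl, h⟩)
      have hCA2 : (['C','A'] <:+ l ++ [c]) ↔ (c = 'A' ∧ ['C'] <:+ l) := by
        have h0 : (['C','A'] : List Char) = ['C'] ++ ['A'] := rfl
        rw [h0, suffix_snoc_iff]
        exact ⟨fun h => ⟨h.1.symm, h.2⟩, fun h => ⟨h.1.symm, h.2⟩⟩
      have hC2 : (['C'] <:+ l ++ [c]) ↔ 'C' = c := singleton_suffix_snoc 'C' l c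
      by_cases hCA : ['C','A'] <:+ l
      · have hC : ¬ ['C'] <:+ l := suffix_CA_not_C l hCA
        have hL : specState l = 2 := by simp [specState, hI, hCA]
        by_cases hc : c = 'C'
        · subst hc
          have hR : specState (l ++ ['C']) = 3 := by
            simp [specState, hinf, hCA]
          rw [hL, hR]; decide
        · by_cases ha : c = 'A'
          · subst ha
            have hR : specState (l ++ ['A']) = 0 := by
              simp [specState, hinf, hCA2, hC2, hC]
            rw [hL, hR]; decide
          · have hc' : ¬ 'C' = c := fun hh => hc hh.symm
            have hR : specState (l ++ [c]) = 0 := by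
              simp [specState, hinf, hCA2, hC2, hc, ha, hc']
            rw [hL, hR]
            simp [bStep, hc, ha]
      · by_cases hC : ['C'] <:+ l
        · have hL : specState l = 1 := by simp [specState, hI, hCA, hC]
          by_cases hc : c = 'C'
          · subst hc
            have hR : specState (l ++ ['C']) = 1 := by
              simp [specState, hinf, hCA2, hC2, hCA]
            rw [hL, hR]; decide
          · by_cases ha : c = 'A'
            · subst ha
              have hR : specState (l ++ ['A']) = 2 := by
                simp [specState, hinf, hCA2, hC2, hC]
              rw [hL, hR]; decide
            · have hc' : ¬ 'C' = c := fun hh => hc hh.symm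
              have hR : specState (l ++ [c]) = 0 := by
                simp [specState, hinf, hCA2, hC2, hc, ha, hc']
              rw [hL, hR]
              simp [bStep, hc, ha]
        · have hL : specState l = 0 := by simp [specState, hI, hCA, hC]
          by_cases hc : c = 'C'
          · subst hc
            have hR : specState (l ++ ['C']) = 1 := by
              simp [specState, hinf, hCA2, hC2, hCA]
            rw [hL, hR]; decide
          · by_cases ha : c = 'A'
            · subst ha
              have hR : specState (l ++ ['A']) = 0 := by
                simp [specState, hinf, hCA2, hC2, hC]
              rw [hL, hR]; decide
            · have hc' : ¬ 'C' = c := fun hh => hc hh.symm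
              have hR : specState (l ++ [c]) = 0 := by
                simp [specState, hinf, hCA2, hC2, hc, ha, hc']
              rw [hL, hR]
              simp [bStep, hc, ha]

theorem scan_mem (l : List Char) :
    l.foldl bStep 0 = 0 ∨ l.foldl bStep 0 = 1 ∨ l.foldl bStep 0 = 2 ∨ l.foldl bStep 0 = 3 := by
  rw [scan_eq_specState]; unfold specState; split_ifs <;> simp

theorem bStep_range (s : Int) (c : Char) :
    bStep s c = 0 ∨ bStep s c = 1 ∨ bStep s c = 2 ∨ bStep s c = 3 := by
  unfold bStep; split_ifs <;> simp

theorem isIn_iff_state (l : List Char) :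
    PySem.Chars.isIn ['C','A','C'] l = true ↔ l.foldl bStep 0 = 3 := by
  rw [PySem.Chars.isIn_iff_infix, scan_eq_specState]
  unfold specState
  split_ifs with h1 h2 h3 <;> simp_all

-- A's recursion equals the automaton recursion
theorem fA_eq_gAux (stop : Int) (n : Nat) (v : Int) (k : List Char) :
    fA n v stop k = gAux n stop v (k.foldl bStep 0) := by
  induction n generalizing v k with
  | zero => rfl
  | succ n ih =>
    unfold fA gAux
    by_cases h1 : v > stop
    · simp [h1]
    · by_cases h2 : v = stop
      · by_cases h3 : PySem.Chars.isIn ['C','A','C'] k = true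
        · have h4 := (isIn_iff_state k).mp h3
          simp [h1, h2, h3, h4]
        · have h4 : k.foldl bStep 0 ≠ 3 := fun hc => h3 ((isIn_iff_state k).mpr hc)
          simp [h1, h2, h3, h4]
      · simp only [if_neg h1,
          if_neg (by tauto : ¬(v = stop ∧ PySem.Chars.isIn ['C','A','C'] k = true)),
          if_neg (by tauto : ¬(v = stop ∧ ¬ PySem.Chars.isIn ['C','A','C'] k = true)),
          if_neg h2]
        rw [ih (v + 1) (k ++ ['A']), ih (v * 3) (k ++ ['B']), ih (v + 5) (k ++ ['C'])]
        simp [List.foldl_append]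

-- fuel irrelevance for gAux above the recursion depth, on v ≥ 1
theorem gAux_fuel (stop : Int) (m n : Nat) (v s : Int) (hv : 1 ≤ v)
    (hm : (stop - v).toNat < m) (hn : (stop - v).toNat < n) :
    gAux m stop v s = gAux n stop v s := by
  induction m generalizing n v s with
  | zero => omega
  | succ m ih =>
    obtain ⟨n', rfl⟩ : ∃ n', n = n' + 1 := ⟨n - 1, by omega⟩
    unfold gAux
    by_cases h1 : v > stop
    · simp [h1]
    · by_cases h2 : v = stop
      · simp [h2]
      · simp only [if_neg h1, if_neg h2]
        rw [ih n' (v + 1) (bStep s 'A') (by omega) (by omega) (by omega),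
            ih n' (v * 3) (bStep s 'B') (by omega) (by omega) (by omega),
            ih n' (v + 5) (bStep s 'C') (by omega) (by omega) (by omega)]

-- canonical-fuel value
def G (stop v s : Int) : Int := gAux ((stop - v).toNat + 1) stop v s

def TblInv (stop : Int) (d : Std.HashMap (Int × Int) Int) (w : Int) : Prop :=
  ∀ v s : Int, w ≤ v → v ≤ stop → (s = 0 ∨ s = 1 ∨ s = 2 ∨ s = 3) →
    d.getD (v, s) 0 = G stop v s

-- the value bRow stores at (w, s), computed from d
def rowVal (stop : Int) (d : Std.HashMap (Int × Int) Int) (w s : Int) : Int :=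
  if w = stop then (if s = 3 then 1 else 0)
  else (if w + 1 > stop then 0 else d.getD (w + 1, bStep s 'A') 0)
     + (if w * 3 > stop then 0 else d.getD (w * 3, bStep s 'B') 0)
     + (if w + 5 > stop then 0 else d.getD (w + 5, bStep s 'C') 0)

theorem getD_insert_fst_ne (d : Std.HashMap (Int × Int) Int) (w j E v s : Int) (h : w < v) :
    (d.insert (w, j) E).getD (v, s) 0 = d.getD (v, s) 0 :=
 by
  simp only [Std.HashMap.getD_insert, beq_iff_eq]
  rw [if_neg (by intro hc; injection hc with h1 h2; omega)]

theorem rowVal_eq_G (stop : Int) (d : Std.HashMap (Int × Int) Int) (w s : Int)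
    (hw : 1 ≤ w) (hws : w ≤ stop) (hd : TblInv stop d (w + 1))
    (hs : s = 0 ∨ s = 1 ∨ s = 2 ∨ s = 3) :
    rowVal stop d w s = G stop w s := by
  unfold rowVal G
  by_cases h2 : w = stop
  · subst h2
    have h0 : (w - w).toNat = 0 := by omega
    simp [gAux, h0]
  · have hlt : w < stop := by omega
    have hg : gAux ((stop - w).toNat + 1) stop w s
        = gAux ((stop - w).toNat) stop (w + 1) (bStep s 'A')
          + gAux ((stop - w).toNat) stop (w * 3) (bStep s 'B')
          + gAux ((stop - w).toNat) stop (w + 5) (bStep s 'C') := by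
      show (if w > stop then 0
            else if w = stop then (if s = 3 then 1 else 0)
            else gAux ((stop - w).toNat) stop (w + 1) (bStep s 'A')
              + gAux ((stop - w).toNat) stop (w * 3) (bStep s 'B')
              + gAux ((stop - w).toNat) stop (w + 5) (bStep s 'C')) = _
      rw [if_neg (by omega : ¬ w > stop), if_neg h2]
    rw [if_neg h2, hg]
    have child : ∀ (v' s' : Int), w + 1 ≤ v' → (s' = 0 ∨ s' = 1 ∨ s' = 2 ∨ s' = 3) →
        (if v' > stop then 0 else d.getD (v', s') 0)
          = gAux ((stop - w).toNat) stop v' s' := by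
      intro v' s' hv' hs'
      by_cases hvs : v' > stop
      · rw [if_pos hvs]
        obtain ⟨m, hm⟩ : ∃ m, (stop - w).toNat = m + 1 := ⟨(stop - w).toNat - 1, by omega⟩
        rw [hm]
        show 0 = (if v' > stop then 0 else _)
        rw [if_pos hvs]
      · rw [if_neg hvs]
        rw [hd v' s' hv' (by omega) hs']
        exact gAux_fuel stop _ _ v' s' (by omega) (by omega) (by omega)
    rw [child (w + 1) _ (by omega) (bStep_range s 'A'),
        child (w * 3) _ (by omega) (bStep_range s 'B'),
        child (w + 5) _ (by omega) (bStep_range s 'C')]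

theorem row_fold (stop w : Int) (hw : 1 ≤ w) (d : Std.HashMap (Int × Int) Int)
    (js : List Int) :
    ∀ d' : Std.HashMap (Int × Int) Int,
      (∀ v s : Int, w < v → d'.getD (v, s) 0 = d.getD (v, s) 0) →
      (∀ v s : Int, w < v →
        (js.foldl (fun dd j => dd.insert (w, j) (rowVal stop dd w j)) d').getD (v, s) 0
          = d.getD (v, s) 0)
      ∧ (∀ s : Int,
        (js.foldl (fun dd j => dd.insert (w, j) (rowVal stop dd w j)) d').getD (w, s) 0
          = if s ∈ js then rowVal stop d w s else d'.getD (w, s) 0) := by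
  induction js with
  | nil =>
    intro d' hag
    exact ⟨fun v s hv => by simpa using hag v s hv, fun s => by simp⟩
  | cons j js ih =>
    intro d' hag
    simp only [List.foldl_cons]
    have hbody : rowVal stop d' w j = rowVal stop d w j := by
      unfold rowVal
      by_cases h2 : w = stop
      · simp [h2]
      · rw [if_neg h2, if_neg h2]
        have e1 : (if w + 1 > stop then (0:Int) else d'.getD (w + 1, bStep j 'A') 0)
            = (if w + 1 > stop then 0 else d.getD (w + 1, bStep j 'A') 0) := by
          split_ifs with hh
          · rfl
          · exact hag _ _ (by omega)
        have e2 : (if w * 3 > stop then (0:Int) else d'.getD (w * 3, bStep j 'B') 0)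
            = (if w * 3 > stop then 0 else d.getD (w * 3, bStep j 'B') 0) := by
          split_ifs with hh
          · rfl
          · exact hag _ _ (by omega)
        have e3 : (if w + 5 > stop then (0:Int) else d'.getD (w + 5, bStep j 'C') 0)
            = (if w + 5 > stop then 0 else d.getD (w + 5, bStep j 'C') 0) := by
          split_ifs with hh
          · rfl
          · exact hag _ _ (by omega)
        rw [e1, e2, e3]
    have hag' : ∀ v s : Int, w < v →
        (d'.insert (w, j) (rowVal stop d' w j)).getD (v, s) 0 = d.getD (v, s) 0 := by
      intro v s hv
      rw [getD_insert_fst_ne d' w j _ v s hv]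
      exact hag v s hv
    obtain ⟨ha, hb⟩ := ih (d'.insert (w, j) (rowVal stop d' w j)) hag'
    refine ⟨ha, ?_⟩
    intro s
    rw [hb s]
    by_cases hsj : s ∈ js
    · simp [hsj]
    · rw [if_neg hsj]
      have hins : (d'.insert (w, j) (rowVal stop d' w j)).getD (w, s) 0
          = if s = j then rowVal stop d w j else d'.getD (w, s) 0 := by
        simp only [Std.HashMap.getD_insert, beq_iff_eq]
        by_cases hsj2 : s = j
        · rw [if_pos (by rw [hsj2]), if_pos hsj2, hbody]
        · rw [if_neg (by intro hc; injection hc with h1 h2; exact hsj2 h2.symm), if_neg hsj2]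
      rw [hins]
      by_cases hsj2 : s = j
      · subst hsj2
        simp [hsj]
      · simp [hsj2, hsj]

theorem bRow_inv (stop : Int) (d : Std.HashMap (Int × Int) Int) (w : Int)
    (hw : 1 ≤ w) (hws : w ≤ stop) (hd : TblInv stop d (w + 1)) :
    TblInv stop (bRow stop d w) w := by
  have hrange : PySem.List.pyRange 0 4 1 = [0, 1, 2, 3] := by decide
  have hbrow : bRow stop d w
      = ([0, 1, 2, 3] : List Int).foldl
          (fun dd j => dd.insert (w, j) (rowVal stop dd w j)) d := by
    unfold bRow
    rw [hrange]
    rfl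
  intro v s hvw hvs hs
  obtain ⟨ha, hb⟩ := row_fold stop w hw d [0, 1, 2, 3] d (fun _ _ _ => rfl)
  by_cases hv : w < v
  · rw [hbrow, ha v s hv]
    exact hd v s (by omega) hvs hs
  · have hveq : v = w := by omega
    subst hveq
    rw [hbrow, hb s]
    have hmem : s ∈ ([0, 1, 2, 3] : List Int) := by rcases hs with rfl | rfl | rfl | rfl <;> simp
    rw [if_pos hmem]
    exact rowVal_eq_G stop d v s hw hws hd hs

theorem fold_inv (stop start : Int) (hs : 1 ≤ start) :
    ∀ (n : Nat) (w : Int) (d : Std.HashMap (Int × Int) Int), (w - (start - 1)).toNat ≤ n →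
      start - 1 ≤ w → w ≤ stop → TblInv stop d (w + 1) →
      TblInv stop ((PySem.List.pyRange w (start - 1) (-1)).foldl (bRow stop) d) start := by
  intro n
  induction n with
  | zero =>
    intro w d hn hw1 hw2 hd
    have hweq : w = start - 1 := by omega
    rw [PySem.List.pyRange_neg_one_eq_nil (by omega)]
    simpa [hweq, sub_add_cancel] using hd
  | succ n ih =>
    intro w d hn hw1 hw2 hd
    by_cases hcase : w ≤ start - 1
    · have hweq : w = start - 1 := by omega
      rw [PySem.List.pyRange_neg_one_eq_nil (by omega)]
      simpa [hweq, sub_add_cancel] using hd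
    · rw [PySem.List.pyRange_neg_one_cons (by omega)]
      rw [List.foldl_cons]
      have hrow := bRow_inv stop d w (by omega) hw2 hd
      have := ih (w - 1) (bRow stop d w) (by omega) (by omega) (by omega)
        (by simpa [sub_add_cancel] using hrow)
      exact this

-- ===== VERDICT (by name: the statement is the Claim_ definition above) =====
theorem f_spec : Claim_equal_f := by
  intro start stop k _ hpre
  unfold Spec_f f f_alt
  by_cases h : start > stop
  · rw [if_pos h]
    have h0 : (stop - start + 1).toNat = 0 := by omega
    rw [h0]
    rfl
  · have h1 : 1 ≤ start := by
      rcases hpre with hp | hp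
      · omega
      · exact hp
    have hle : start ≤ stop := by omega
    rw [if_neg h]
    show fA (stop - start + 1).toNat start stop k.toList
        = ((PySem.List.pyRange stop (start - 1) (-1)).foldl (bRow stop)
            (∅ : Std.HashMap (Int × Int) Int)).getD (start, k.toList.foldl bStep 0) 0
    have hempty : TblInv stop (∅ : Std.HashMap (Int × Int) Int) (stop + 1) := by
      intro v s hv hvs hsr; omega
    have htbl := fold_inv stop start h1 (stop - (start - 1)).toNat stop (∅ : Std.HashMap (Int × Int) Int)
      (le_refl _) (by omega) (le_refl _) hempty
    rw [htbl start (k.toList.foldl bStep 0) (le_refl _) hle (scan_mem k.toList)]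
    rw [fA_eq_gAux]
    have hfuel : (stop - start + 1).toNat = (stop - start).toNat + 1 := by omega
    rw [hfuel]
    rfl
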